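-- pv_equiv track=rewrite | github.com/bhardwajRahul/aegis-stack | aegis/core/template_cleanup.py | _should_skip_sync
-- ===== SOURCE A (Python) =====
-- def _should_skip_sync(relative_path: str) -> bool:
--     """Check if a file should be skipped during template sync."""
--     skip_patterns = [
--         ".copier-answers.yml",
--         ".env",
--         ".python-version",
--         ".venv/",
--         "__pycache__/",
--         ".git/",
--         "*.pyc",
--     ]
--
--     for pattern in skip_patterns:
--         if pattern.endswith("/"):
--             if relative_path.startswith(pattern) or f"/{pattern}" in relative_path:
--                 return True
--         elif pattern.startswith("*"):
--             if relative_path.endswith(pattern[1:]):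
--                 return True
--         elif relative_path == pattern:
--             return True
--
--     return False
-- ===== SOURCE B (Python) =====
-- _SKIP_DIRS = frozenset({".venv", "__pycache__", ".git"})
-- _SKIP_FILES = frozenset({".copier-answers.yml", ".env", ".python-version"})
--
--
-- def _should_skip_sync(relative_path: str) -> bool:
--     """Check if a file should be skipped during template sync."""
--     *dirs, name = relative_path.split("/")
--     if any(seg in _SKIP_DIRS for seg in dirs):
--         return True
--     if not dirs and name in _SKIP_FILES:
--         return True
--     return name.endswith(".pyc")
-- ===== Notes on version B (the rewrite author's own statement) =====
-- stated objective: alternative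
-- what changed: B parses the path once into its structural components (the list of directory segments plus the basename, by splitting on the separator character) and decides on those components, instead of A's raw-string prefix/substring/suffix matching against each pattern in a shape-dispatching loop.
import Mathlib
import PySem

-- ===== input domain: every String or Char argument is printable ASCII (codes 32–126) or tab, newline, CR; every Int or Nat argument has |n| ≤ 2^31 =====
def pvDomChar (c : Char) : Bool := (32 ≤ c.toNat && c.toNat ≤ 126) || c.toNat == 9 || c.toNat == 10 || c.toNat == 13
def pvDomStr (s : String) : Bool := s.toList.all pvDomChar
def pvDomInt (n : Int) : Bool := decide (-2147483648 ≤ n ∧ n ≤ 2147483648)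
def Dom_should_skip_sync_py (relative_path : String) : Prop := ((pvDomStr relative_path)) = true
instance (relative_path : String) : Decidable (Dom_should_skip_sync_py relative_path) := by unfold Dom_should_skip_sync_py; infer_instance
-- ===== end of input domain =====

-- B parses the path once into its components (directory segments + basename, via split on '/')
-- and decides on those, instead of A's per-pattern prefix/substring/suffix matching on the raw
-- string (alternative decomposition; same behaviour).

-- ===== PORT A =====
def pvSkipPatterns : List String :=
  [".copier-answers.yml", ".env", ".python-version", ".venv/", "__pycache__/", ".git/", "*.pyc"]

-- the 'for pattern in skip_patterns' loop with its early returns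
def pvALoop (relative_path : String) : List String → Bool
  | [] => false
  | p :: rest =>
    if PySem.Str.endswith p "/" then
      if PySem.Str.startswith relative_path p || PySem.Str.isIn ("/" ++ p) relative_path then
        true
      else pvALoop relative_path rest
    else if PySem.Str.startswith p "*" then
      if PySem.Str.endswith relative_path (PySem.Str.slice p (some 1) none) then
        true
      else pvALoop relative_path rest
    else if relative_path == p then
      true
    else pvALoop relative_path rest

def should_skip_sync_py (relative_path : String) : Bool :=
  pvALoop relative_path pvSkipPatterns

-- ===== PORT B =====
def pvSkipDirs : PySem.Set (List Char) :=
  PySem.Set.ofList [".venv".toList, "__pycache__".toList, ".git".toList]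
def pvSkipFiles : PySem.Set (List Char) :=
  PySem.Set.ofList [".copier-answers.yml".toList, ".env".toList, ".python-version".toList]

-- '*dirs, name = relative_path.split("/")' (split("/") ported as List.splitOn, which agrees
-- with Python's str.split for a one-character separator), then the three component checks.
def should_skip_sync_py_alt (relative_path : String) : Bool :=
  let parts := relative_path.toList.splitOn '/'
  let dirs := parts.dropLast
  let name := parts.getLastD []
  if dirs.any (fun seg => PySem.Set.contains pvSkipDirs seg) then true
  else if dirs.isEmpty && PySem.Set.contains pvSkipFiles name then true
  else PySem.Chars.endswith name ".pyc".toList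

-- ===== PRECONDITION & SPEC =====
def Spec_should_skip_sync_py (relative_path : String) (out : Bool) : Prop := out = should_skip_sync_py_alt relative_path
instance (relative_path : String) (out : Bool) : Decidable (Spec_should_skip_sync_py relative_path out) := by unfold Spec_should_skip_sync_py; infer_instance

-- ===== CLAIM (what is proved, stated in full; the proofs are below) =====
def Claim_equal_should_skip_sync_py : Prop := ∀ (relative_path : String), Dom_should_skip_sync_py relative_path → Spec_should_skip_sync_py relative_path (should_skip_sync_py relative_path)

-- ===== LEMMAS AND PROOFS =====

-- every piece of splitOn '/' is slash-free
theorem pvSplitOn_pieces (cs : List Char) : ∀ p ∈ cs.splitOn '/', '/' ∉ p := by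
  induction cs with
  | nil =>
    intro p hp
    simp [List.splitOn, List.splitOnP, List.splitOnP.go] at hp
    simp [hp]
  | cons c t ih =>
    intro p hp
    simp only [List.splitOn] at hp ih
    rw [List.splitOnP_cons] at hp
    by_cases hc : c = '/'
    · simp [hc] at hp
      rcases hp with h | h
      · simp [h]
      · exact ih p h
    · simp [hc] at hp
      rcases hs : List.splitOnP (fun a => a == '/') t with _ | ⟨h0, l⟩
      · exact absurd hs (List.splitOnP_ne_nil _ t)
      · rw [hs] at hp; simp at hp
        rcases hp with h | h
        · subst h
          intro hm
          simp at hm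
          rcases hm with hm | hm
          · exact hc hm.symm
          · exact ih h0 (by rw [hs]; simp) hm
        · exact ih p (by rw [hs]; simp [h])

theorem pvSplitOn_ne_nil (cs : List Char) : cs.splitOn '/' ≠ [] := by
  simp only [List.splitOn]
  exact List.splitOnP_ne_nil _ _

-- two slash-free heads before the same separator force equality
theorem pvLemF : ∀ (x d a b : List Char), '/' ∉ x → '/' ∉ d →
    x ++ '/' :: a = d ++ '/' :: b → x = d ∧ a = b := by
  intro x
  induction x with
  | nil =>
    intro d a b _ hd h
    cases d with
    | nil => simpa using h
    | cons e d' =>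
      simp at h
      exact absurd (by simp [← h.1] : ('/':Char) ∈ e :: d') hd
  | cons c x' ih =>
    intro d a b hx hd h
    cases d with
    | nil =>
      simp at h
      exact absurd (by simp [h.1] : '/' ∈ c :: x') hx
    | cons e d' =>
      simp at h
      obtain ⟨he, h2⟩ := h
      have := ih d' a b (by intro m; exact hx (by simp [m])) (by intro m; exact hd (by simp [m])) h2
      exact ⟨by simp [he, this.1], this.2⟩

-- what follows a separator inside 'x ++ '/' :: i' (x slash-free) is an infix of '/' :: i
theorem pvLemG : ∀ (x u i r : List Char), '/' ∉ x →
    x ++ '/' :: i = u ++ '/' :: r → ('/' :: r) <:+: ('/' :: i) := by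
  intro x
  induction x with
  | nil =>
    intro u i r _ h
    cases u with
    | nil => simp at h; simp [h]
    | cons e u' =>
      simp at h
      obtain ⟨he, h2⟩ := h
      have : ('/' :: r) <:+ i := by rw [h2]; exact ⟨u', rfl⟩
      exact (this.isInfix).trans (List.infix_cons (List.infix_refl i))
  | cons c x' ih =>
    intro u i r hx h
    cases u with
    | nil =>
      simp at h
      exact absurd (by simp [h.1] : '/' ∈ c :: x') hx
    | cons e u' =>
      simp at h
      exact ih u' i r (by intro m; exact hx (by simp [m])) h.2

-- the heart: d is a non-last '/'-segment of the joined list iff '/'+d+'/' occurs in '/' + joined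
theorem pvLemE (d : List Char) (hd : '/' ∉ d) :
    ∀ (L : List (List Char)), L ≠ [] → (∀ x ∈ L, '/' ∉ x) →
    (d ∈ L.dropLast ↔ ('/' :: (d ++ ['/'])) <:+: ('/' :: (['/'].intercalate L))) := by
  intro L
  induction L with
  | nil => intro h; exact absurd rfl h
  | cons x M ih =>
    intro _ hfree
    cases M with
    | nil =>
      simp only [List.dropLast_singleton, List.not_mem_nil, false_iff]
      intro hinf
      have hcnt := hinf.sublist.count_le '/'
      simp [List.intercalate] at hcnt
      have h1 : d.count '/' = 0 := List.count_eq_zero.mpr hd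
      have h2 : x.count '/' = 0 := List.count_eq_zero.mpr (hfree x (by simp))
      omega
    | cons y M' =>
      have hx : '/' ∉ x := hfree x (by simp)
      have hIH := ih (by simp) (fun z hz => hfree z (by simp [hz]))
      have hint : ['/'].intercalate (x :: y :: M') = x ++ '/' :: (['/'].intercalate (y :: M')) := by
        simp [List.intercalate]
      rw [hint]
      set I := ['/'].intercalate (y :: M') with hI
      constructor
      · intro hmem
        rw [List.dropLast_cons_of_ne_nil (by simp)] at hmem
        rcases List.mem_cons.mp hmem with h | h
        · subst h
          exact List.IsPrefix.isInfix ⟨I, by simp⟩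
        · have := (hIH.mp h)
          have hsuf : ('/' :: I) <:+ ('/' :: x ++ '/' :: I) := ⟨'/' :: x, by simp⟩
          exact this.trans hsuf.isInfix
      · intro hinf
        rw [List.dropLast_cons_of_ne_nil (by simp)]
        rcases hinf with ⟨u, v, huv⟩
        cases u with
        | nil =>
          simp at huv
          have : x ++ '/' :: I = d ++ '/' :: v := by
            have := huv
            simpa using this.symm
          have := pvLemF x d I v hx hd this
          simp [this.1]
        | cons e u' =>
          have he : e = '/' := by
            have := congrArg (fun l => l.head?) huv
            have h2 : '/' = e := by simpa using this.symm
            exact h2.symm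
          subst he
          have htail : x ++ '/' :: I = u' ++ '/' :: (d ++ '/' :: v) := by
            have := congrArg List.tail huv
            simpa using this.symm
          have hinf2 := pvLemG x u' I (d ++ '/' :: v) hx htail
          have hpre : ('/' :: (d ++ ['/'])) <+: ('/' :: (d ++ '/' :: v)) := ⟨v, by simp⟩
          have : ('/' :: (d ++ ['/'])) <:+: ('/' :: I) := hpre.isInfix.trans hinf2
          right
          exact hIH.mpr this

-- A's directory test, expressed on the split segments
theorem pvBridgeDir (cs d : List Char) (hd : '/' ∉ d) :
    ((d ++ ['/']) <+: cs ∨ ('/' :: (d ++ ['/'])) <:+: cs) ↔ d ∈ (cs.splitOn '/').dropLast := by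
  have hint : ['/'].intercalate (cs.splitOn '/') = cs := List.intercalate_splitOn cs '/'
  rw [pvLemE d hd (cs.splitOn '/') (pvSplitOn_ne_nil cs) (pvSplitOn_pieces cs), hint,
    List.infix_cons_iff, List.cons_prefix_cons]
  simp

-- a slash-free suffix of the joined list is a suffix of the last piece
theorem pvBridgeSufAux (pat : List Char) (hp : '/' ∉ pat) :
    ∀ (L : List (List Char)) (h : L ≠ []), (∀ x ∈ L, '/' ∉ x) →
    (pat <:+ ['/'].intercalate L ↔ pat <:+ L.getLast h) := by
  intro L
  induction L with
  | nil => intro h; exact absurd rfl h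
  | cons x M ih =>
    intro _ hfree
    cases M with
    | nil => simp [List.intercalate]
    | cons y M' =>
      have hint : ['/'].intercalate (x :: y :: M') = x ++ '/' :: (['/'].intercalate (y :: M')) := by
        simp [List.intercalate]
      rw [hint, List.getLast_cons (by simp)]
      rw [← ih (by simp) (fun z hz => hfree z (by simp [hz]))]
      set I := ['/'].intercalate (y :: M') with hI
      constructor
      · intro hsuf
        have hwhole : ('/' :: I) <:+ (x ++ '/' :: I) := ⟨x, rfl⟩
        by_cases hlen : pat.length ≤ I.length
        · have h2 : pat <:+ ('/' :: I) :=
            List.suffix_of_suffix_length_le hsuf hwhole (by simp; omega)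
          rcases List.suffix_cons_iff.mp h2 with h | h
          · exact absurd (congrArg List.length h) (by simp; omega)
          · exact h
        · have h2 : ('/' :: I) <:+ pat :=
            List.suffix_of_suffix_length_le hwhole hsuf (by simp; omega)
          exact absurd (h2.subset (by simp)) hp
      · intro hsuf
        exact hsuf.trans ⟨x ++ ['/'], by simp⟩

theorem pvGetLastD (L : List (List Char)) (h : L ≠ []) : L.getLastD [] = L.getLast h := by
  cases L with
  | nil => exact absurd rfl h
  | cons a t => simp [List.getLastD_eq_getLast?, List.getLast?_eq_some_getLast]

-- A's suffix test, expressed on the basename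
theorem pvBridgeSuf (cs pat : List Char) (hp : '/' ∉ pat) :
    pat <:+ cs ↔ pat <:+ (cs.splitOn '/').getLastD [] := by
  have hne := pvSplitOn_ne_nil cs
  have h := pvBridgeSufAux pat hp (cs.splitOn '/') hne (pvSplitOn_pieces cs)
  rw [List.intercalate_splitOn] at h
  rw [h, pvGetLastD _ hne]

-- A's equality test, expressed on the components
theorem pvBridgeExact (cs p : List Char) (hp : '/' ∉ p) :
    cs = p ↔ ((cs.splitOn '/').dropLast = [] ∧ (cs.splitOn '/').getLastD [] = p) := by
  constructor
  · intro h
    subst h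
    have h2 : List.splitOn '/' (['/'].intercalate [cs]) = [cs] :=
      List.splitOn_intercalate [cs] '/' (by simpa using hp) (by simp)
    simp [List.intercalate] at h2
    simp [h2]
  · rintro ⟨h1, h2⟩
    have hne := pvSplitOn_ne_nil cs
    have hcat := List.dropLast_concat_getLast hne
    rw [pvGetLastD _ hne] at h2
    have hL : cs.splitOn '/' = [p] := by
      rw [← hcat, h1, h2]; rfl
    have hI := List.intercalate_splitOn cs '/'
    rw [hL] at hI
    simpa [List.intercalate] using hI.symm

set_option maxHeartbeats 1000000 in
theorem pvMain (rp : String) : should_skip_sync_py rp = should_skip_sync_py_alt rp := by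
  rw [Bool.eq_iff_iff]
  simp only [should_skip_sync_py, pvSkipPatterns, pvALoop, should_skip_sync_py_alt, pvSkipDirs, pvSkipFiles,
    show PySem.Str.endswith ".copier-answers.yml" "/" = false from rfl,
    show PySem.Str.endswith ".env" "/" = false from rfl,
    show PySem.Str.endswith ".python-version" "/" = false from rfl,
    show PySem.Str.endswith ".venv/" "/" = true from rfl,
    show PySem.Str.endswith "__pycache__/" "/" = true from rfl,
    show PySem.Str.endswith ".git/" "/" = true from rfl,
    show PySem.Str.endswith "*.pyc" "/" = false from rfl,
    show PySem.Str.startswith ".copier-answers.yml" "*" = false from rfl,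
    show PySem.Str.startswith ".env" "*" = false from rfl,
    show PySem.Str.startswith ".python-version" "*" = false from rfl,
    show PySem.Str.startswith "*.pyc" "*" = true from rfl,
    show PySem.Str.slice "*.pyc" (some 1) none = ".pyc" from rfl,
    Bool.false_eq_true, if_false, if_true]
  simp only [Bool.if_true_left, Bool.if_false_right, Bool.or_eq_true, decide_eq_true_eq,
    beq_iff_eq, String.ext_iff, PySem.Str.startswith_eq, PySem.Str.isIn_eq, PySem.Str.endswith_eq,
    PySem.Chars.startswith_iff, PySem.Chars.isIn_iff_infix, PySem.Chars.endswith_iff,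
    String.toList_append, List.any_eq_true, List.isEmpty_iff, Bool.and_eq_true,
    PySem.Set.contains_eq_listContains, List.contains_eq_mem]
  rw [show "/".toList ++ ".venv/".toList = '/' :: (".venv".toList ++ ['/']) from by decide,
      show "/".toList ++ "__pycache__/".toList = '/' :: ("__pycache__".toList ++ ['/']) from by decide,
      show "/".toList ++ ".git/".toList = '/' :: (".git".toList ++ ['/']) from by decide,
      show ".venv/".toList = ".venv".toList ++ ['/'] from by decide,
      show "__pycache__/".toList = "__pycache__".toList ++ ['/'] from by decide,
      show ".git/".toList = ".git".toList ++ ['/'] from by decide]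
  have hd1 := pvBridgeDir rp.toList ".venv".toList (by decide)
  have hd2 := pvBridgeDir rp.toList "__pycache__".toList (by decide)
  have hd3 := pvBridgeDir rp.toList ".git".toList (by decide)
  have hs := pvBridgeSuf rp.toList ".pyc".toList (by decide)
  have he1 := pvBridgeExact rp.toList ".copier-answers.yml".toList (by decide)
  have he2 := pvBridgeExact rp.toList ".env".toList (by decide)
  have he3 := pvBridgeExact rp.toList ".python-version".toList (by decide)
  rw [hd1, hd2, hd3, he1, he2, he3, hs]
  simp only [PySem.Set.mem_ofList, List.mem_cons, List.not_mem_nil, or_false, and_true]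
  rw [show (∃ x ∈ (List.splitOn '/' rp.toList).dropLast,
        x = ".venv".toList ∨ x = "__pycache__".toList ∨ x = ".git".toList) ↔
      (".venv".toList ∈ (List.splitOn '/' rp.toList).dropLast ∨
        "__pycache__".toList ∈ (List.splitOn '/' rp.toList).dropLast ∨
        ".git".toList ∈ (List.splitOn '/' rp.toList).dropLast) from by
    constructor
    · rintro ⟨x, hx, (rfl | rfl | rfl)⟩
      · exact Or.inl hx
      · exact Or.inr (Or.inl hx)
      · exact Or.inr (Or.inr hx)
    · rintro (h | h | h)
      · exact ⟨_, h, Or.inl rfl⟩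
      · exact ⟨_, h, Or.inr (Or.inl rfl)⟩
      · exact ⟨_, h, Or.inr (Or.inr rfl)⟩]
  generalize (".venv".toList ∈ (List.splitOn '/' rp.toList).dropLast) = M1
  generalize ("__pycache__".toList ∈ (List.splitOn '/' rp.toList).dropLast) = M2
  generalize (".git".toList ∈ (List.splitOn '/' rp.toList).dropLast) = M3
  generalize ((List.splitOn '/' rp.toList).dropLast = []) = E
  generalize ((List.splitOn '/' rp.toList).getLastD [] = ".copier-answers.yml".toList) = F1
  generalize ((List.splitOn '/' rp.toList).getLastD [] = ".env".toList) = F2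
  generalize ((List.splitOn '/' rp.toList).getLastD [] = ".python-version".toList) = F3
  generalize (".pyc".toList <:+ (List.splitOn '/' rp.toList).getLastD []) = S
  clear hd1 hd2 hd3 hs he1 he2 he3
  tauto

-- ===== VERDICT (by name: the statement is the Claim_ definition above) =====
theorem should_skip_sync_py_spec : Claim_equal_should_skip_sync_py := by
  intro rp _
  unfold Spec_should_skip_sync_py
  exact pvMain rp
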